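-- pv_equiv track=rewrite | github.com/Lucassarantes/codesignal | test_56.py | solution
-- ===== SOURCE A (Python) =====
-- def solution(matrix):
--     rows = len(matrix)
--     cols = len(matrix[0])
--
--     if rows < 2 or cols < 2:
--         return 0
--
--     squares = set()
--
--     for i in range(rows - 1):
--         for j in range(cols - 1):
--             square = (
--                 matrix[i][j], matrix[i][j+1],
--                 matrix[i+1][j], matrix[i+1][j+1]
--             )
--             squares.add(tuple(square))
--
--     return len(squares)
-- ===== SOURCE B (Python) =====
-- def solution(matrix):
--     cols = len(matrix[0])
--     if len(matrix) < 2 or cols < 2: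
--         return 0
--     windows = []
--     for r0, r1 in zip(matrix, matrix[1:]):
--         t0, t1 = r0[:cols], r1[:cols]
--         for (a, b), (c, d) in zip(zip(t0, t0[1:]), zip(t1, t1[1:])):
--             windows.append([a, b, c, d])
--     windows.sort()
--     count = 1
--     for prev, cur in zip(windows, windows[1:]):
--         if cur != prev:
--             count += 1
--     return count
-- ===== Notes on version B (the rewrite author's own statement) =====
-- stated objective: alternative
-- what changed: B collects the 2x2 windows by zipping adjacent rows and adjacent column pairs (no index arithmetic) and deduplicates by sorting the window list and counting groups of consecutive equal windows, instead of A's index-driven double loop inserting into a hash set.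
-- outside the precondition, e.g. on solution([[1, 2], [3]]): A raises IndexError, B returns 1
import Mathlib
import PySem

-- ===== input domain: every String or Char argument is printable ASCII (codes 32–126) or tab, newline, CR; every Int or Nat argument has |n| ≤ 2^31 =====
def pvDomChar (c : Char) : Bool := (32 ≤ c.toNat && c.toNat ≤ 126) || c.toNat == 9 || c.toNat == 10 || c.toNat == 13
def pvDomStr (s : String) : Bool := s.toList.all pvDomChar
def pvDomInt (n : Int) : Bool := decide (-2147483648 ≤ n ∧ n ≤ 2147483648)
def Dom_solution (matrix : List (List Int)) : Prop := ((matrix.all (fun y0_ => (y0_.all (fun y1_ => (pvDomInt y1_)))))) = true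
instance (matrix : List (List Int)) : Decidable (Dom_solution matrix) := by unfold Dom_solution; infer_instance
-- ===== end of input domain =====

-- B gathers the 2x2 windows by zipping adjacent rows and adjacent column pairs and deduplicates
-- by sort-and-scan, instead of A's index-driven double loop inserting into a hash set.

-- ===== PORT A =====
-- the 2x2 window at (i, j): (matrix[i][j], matrix[i][j+1], matrix[i+1][j], matrix[i+1][j+1]), as a 4-element list
def pvWin (matrix : List (List Int)) (i j : Int) : List Int :=
  [PySem.List.pyGetD (PySem.List.pyGetD matrix i []) j 0,
   PySem.List.pyGetD (PySem.List.pyGetD matrix i []) (j + 1) 0,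
   PySem.List.pyGetD (PySem.List.pyGetD matrix (i + 1) []) j 0,
   PySem.List.pyGetD (PySem.List.pyGetD matrix (i + 1) []) (j + 1) 0]

def solution (matrix : List (List Int)) : Int :=
  let rows : Int := matrix.length
  let cols : Int := (PySem.List.pyGetD matrix 0 []).length
  if rows < 2 || cols < 2 then 0
  else
    let squares : PySem.Set (List Int) :=
      (PySem.List.pyRange 0 (rows - 1) 1).foldl (fun sq i =>
        (PySem.List.pyRange 0 (cols - 1) 1).foldl (fun sq j =>
          PySem.Set.add sq (pvWin matrix i j)) sq) PySem.Set.empty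
    (squares.length : Int)

-- ===== PORT B =====
-- the inner loop of B over one pair of adjacent rows (already truncated to width cols)
def pvRowWins (t0 t1 : List Int) (acc : List (List Int)) : List (List Int) :=
  ((t0.zip (PySem.List.slice t0 (some 1) none)).zip
   (t1.zip (PySem.List.slice t1 (some 1) none))).foldl
    (fun acc q => acc ++ [[q.1.1, q.1.2, q.2.1, q.2.2]]) acc

def solution_alt (matrix : List (List Int)) : Int :=
  let cols : Int := (PySem.List.pyGetD matrix 0 []).length
  if (matrix.length : Int) < 2 || cols < 2 then 0
  else
    let windows : List (List Int) :=
      (matrix.zip (PySem.List.slice matrix (some 1) none)).foldl (fun acc p =>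
        pvRowWins (PySem.List.slice p.1 none (some cols))
                  (PySem.List.slice p.2 none (some cols)) acc) []
    let ws := PySem.List.sorted windows (fun x => x) false
    (ws.zip (PySem.List.slice ws (some 1) none)).foldl
      (fun count p => if p.2 != p.1 then count + 1 else count) 1

-- ===== PRECONDITION & SPEC =====
-- Pre_ excludes exactly the inputs where A raises an IndexError: the empty matrix
-- (matrix[0] fails), and matrices with at least 2 rows and 2 columns in which some
-- row is shorter than the first row (matrix[i][j] / matrix[i][j+1] fails).
def Pre_solution (matrix : List (List Int)) : Prop :=
  (!matrix.isEmpty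
    && (matrix.length < 2 || (matrix.headD []).length < 2
        || matrix.all (fun r => (matrix.headD []).length ≤ r.length))) = true
instance (matrix : List (List Int)) : Decidable (Pre_solution matrix) := by
  unfold Pre_solution; infer_instance

def pvWitness_solution : List (List Int) := [[1, 2], [3, 4]]

def Spec_solution (matrix : List (List Int)) (out : Int) : Prop := out = solution_alt matrix
instance (matrix : List (List Int)) (out : Int) : Decidable (Spec_solution matrix out) := by unfold Spec_solution; infer_instance

-- ===== CLAIM (what is proved, stated in full; the proofs are below) =====
def Claim_equal_solution : Prop := ∀ (matrix : List (List Int)), Dom_solution matrix → Pre_solution matrix → Spec_solution matrix (solution matrix)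

-- ===== LEMMAS AND PROOFS =====

-- A's nested set-insertion loop is Set.update with the row-major window list
theorem pv_foldl_nested_add {α β γ : Type} [BEq γ] (L : List α) (M : List β) (w : α → β → γ)
    (s : PySem.Set γ) :
    L.foldl (fun sq i => M.foldl (fun sq j => PySem.Set.add sq (w i j)) sq) s
      = PySem.Set.update s (L.flatMap fun i => M.map (w i)) := by
  induction L generalizing s with
  | nil => simp [PySem.Set.update]
  | cons x L ih =>
    simp only [List.foldl_cons, List.flatMap_cons, ih]
    simp [PySem.Set.update, List.foldl_append, List.foldl_map]

-- len(set(l)) is the number of distinct elements of l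
theorem pv_setLen_eq_card (l : List (List Int)) :
    (PySem.Set.ofList l).length = l.toFinset.card := by
  rw [← List.toFinset_card_of_nodup (PySem.Set.nodup_ofList l)]
  congr 1
  ext x
  simp [PySem.Set.mem_ofList]

-- the port's sorted (elaborated instances) is sorted with the LinearOrder instances
theorem pv_sorted_inst (ws : List (List Int)) :
    PySem.List.sorted ws (fun x => x) false
      = @PySem.List.sorted (List Int) (List Int) List.instLinearOrder.toLT
          LinearOrder.toDecidableLT ws (fun x => x) false := by
  congr 1

-- on a sorted list, 1 + (number of adjacent unequal pairs) = number of distinct elements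
theorem pv_groups_eq_card {α : Type} [LinearOrder α] [DecidableEq α] [BEq α] [LawfulBEq α] :
    ∀ (l : List α), l ≠ [] → l.Pairwise (· ≤ ·) →
      1 + List.countP (fun p : α × α => p.2 != p.1) (l.zip l.tail) = l.toFinset.card := by
  intro l
  induction l with
  | nil => intro h; exact absurd rfl h
  | cons a t ih =>
    intro _ hp
    cases t with
    | nil => simp
    | cons b t' =>
      have ha : ∀ x ∈ b :: t', a ≤ x := (List.pairwise_cons.mp hp).1
      have hp' : (b :: t').Pairwise (· ≤ ·) := (List.pairwise_cons.mp hp).2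
      have ihv := ih (by simp) hp'
      by_cases hab : a = b
      · subst hab
        have hfin : (a :: a :: t').toFinset = (a :: t').toFinset := by simp
        rw [hfin, ← ihv]
        simp
      · have hnot : a ∉ (b :: t').toFinset := by
          simp only [List.mem_toFinset]
          intro hmem
          rcases List.mem_cons.mp hmem with h | h
          · exact hab h
          · have hba : b ≤ a := ((List.pairwise_cons.mp hp').1) a h
            exact hab (le_antisymm (ha b (by simp)) hba)
        have hfin : (a :: b :: t').toFinset = insert a ((b :: t').toFinset) := by simp
        rw [hfin, Finset.card_insert_of_notMem hnot, ← ihv]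
        have hne : (b != a) = true := by
          simp only [bne_iff_ne]
          exact fun h => hab h.symm
        simp [hne]
        omega

-- B's inner zip loop over one truncated row pair produces exactly A's windows for that row pair
theorem pv_rowWins_eq (r0 r1 : List Int) (c : ℕ) (h0 : c ≤ r0.length) (h1 : c ≤ r1.length)
    (acc : List (List Int)) :
    pvRowWins (PySem.List.slice r0 none (some (c : Int)))
              (PySem.List.slice r1 none (some (c : Int))) acc
      = acc ++ (PySem.List.pyRange 0 ((c : Int) - 1) 1).map (fun j =>
          [PySem.List.pyGetD r0 j 0, PySem.List.pyGetD r0 (j + 1) 0,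
           PySem.List.pyGetD r1 j 0, PySem.List.pyGetD r1 (j + 1) 0]) := by
  unfold pvRowWins
  rw [PySem.List.slice_to_natCast r0, PySem.List.slice_to_natCast r1,
      PySem.List.slice_from_one, PySem.List.slice_from_one,
      PySem.List.foldl_append_singleton_eq_map]
  congr 1
  apply List.ext_getElem
  · simp [PySem.List.length_pyRange_one]
    omega
  · intro k hk1 hk2
    simp only [List.length_map, List.length_zip, List.length_take, List.length_tail,
      PySem.List.length_pyRange_one] at hk1 hk2
    have hk : k < c - 1 := by omega
    have hkc : k < c := by omega
    have hk1c : k + 1 < c := by omega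
    simp only [List.getElem_map, List.getElem_zip, List.getElem_tail, List.getElem_take,
      PySem.List.getElem_pyRange_one, zero_add]
    have hcast : ((k : Int)) + 1 = (((k + 1 : ℕ) : Int)) := by push_cast; ring
    rw [hcast,
        PySem.List.pyGetD_eq_getElem r0 (i := (k : Int)) 0 (by omega) (by omega),
        PySem.List.pyGetD_eq_getElem r0 (i := ((k + 1 : ℕ) : Int)) 0 (by omega) (by omega),
        PySem.List.pyGetD_eq_getElem r1 (i := (k : Int)) 0 (by omega) (by omega),
        PySem.List.pyGetD_eq_getElem r1 (i := ((k + 1 : ℕ) : Int)) 0 (by omega) (by omega)]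
    simp

-- zip(matrix, matrix[1:]) as an indexed range over the rows
theorem pv_zip_adjacent (matrix : List (List Int)) :
    matrix.zip matrix.tail
      = (PySem.List.pyRange 0 ((matrix.length : Int) - 1) 1).map
          (fun i => (PySem.List.pyGetD matrix i [], PySem.List.pyGetD matrix (i + 1) [])) := by
  apply List.ext_getElem
  · simp [PySem.List.length_pyRange_one]
  · intro k hk1 hk2
    simp only [List.length_zip, List.length_tail] at hk1
    have hkm : k + 1 < matrix.length := by omega
    simp only [List.getElem_map, List.getElem_zip, List.getElem_tail,
      PySem.List.getElem_pyRange_one, zero_add]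
    have hcast : ((k : Int)) + 1 = (((k + 1 : ℕ) : Int)) := by push_cast; ring
    rw [hcast,
        PySem.List.pyGetD_eq_getElem matrix (i := (k : Int)) [] (by omega) (by omega),
        PySem.List.pyGetD_eq_getElem matrix (i := ((k + 1 : ℕ) : Int)) [] (by omega) (by omega)]
    simp

-- ===== VERDICT (by name: the statement is the Claim_ definition above) =====
theorem solution_spec : Claim_equal_solution := by
  intro matrix _ hpre
  unfold Spec_solution solution solution_alt
  by_cases hcond : ((decide ((matrix.length : Int) < 2) || decide (((PySem.List.pyGetD matrix 0 []).length : Int) < 2)) = true)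
  · simp only [hcond, if_true]
  · simp only [hcond]
    have hrows : 2 ≤ (matrix.length : Int) := by
      simp only [Bool.or_eq_true, decide_eq_true_eq, not_or] at hcond
      omega
    have hcols : 2 ≤ ((PySem.List.pyGetD matrix 0 []).length : Int) := by
      simp only [Bool.or_eq_true, decide_eq_true_eq, not_or] at hcond
      omega
    set c : ℕ := (PySem.List.pyGetD matrix 0 []).length with hc0
    have hmne : matrix ≠ [] := by
      intro h
      rw [h] at hrows
      simp at hrows
    have hhead : matrix.headD [] = PySem.List.pyGetD matrix 0 [] := by
      rw [PySem.List.pyGetD_eq_getElem matrix (i := 0) [] (by omega) (by omega)]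
      cases matrix with
      | nil => exact absurd rfl hmne
      | cons a t => simp
    have hall : ∀ r ∈ matrix, c ≤ r.length := by
      unfold Pre_solution at hpre
      simp only [Bool.and_eq_true, Bool.or_eq_true, decide_eq_true_eq,
        List.all_eq_true] at hpre
      obtain ⟨-, h⟩ := hpre
      intro r hr
      rcases h with (h' | h') | h'
      · exfalso
        omega
      · exfalso
        rw [hhead, ← hc0] at h'
        omega
      · have := h' r hr
        rw [hhead, ← hc0] at this
        exact this
    set L := PySem.List.pyRange 0 ((matrix.length : Int) - 1) 1 with hL
    set M := PySem.List.pyRange 0 ((c : Int) - 1) 1 with hM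
    set ws : List (List Int) := L.flatMap (fun i => M.map (pvWin matrix i)) with hws
    have hwsne : ws ≠ [] := by
      have h0L : (0 : Int) ∈ L := by
        rw [hL, PySem.List.mem_pyRange_one]
        omega
      have h0M : (0 : Int) ∈ M := by
        rw [hM, PySem.List.mem_pyRange_one]
        omega
      have hmem : pvWin matrix 0 0 ∈ ws := by
        rw [hws]
        exact List.mem_flatMap.mpr ⟨0, h0L, List.mem_map_of_mem h0M⟩
      exact List.ne_nil_of_mem hmem
    -- A side: the nested hash-set loop counts the distinct windows of ws
    rw [pv_foldl_nested_add L M (pvWin matrix) PySem.Set.empty]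
    have hupd : PySem.Set.update PySem.Set.empty ws = PySem.Set.ofList ws := rfl
    rw [← hws, hupd, pv_setLen_eq_card]
    -- B side: the zip-based collection builds exactly ws
    have hBwin : (matrix.zip (PySem.List.slice matrix (some 1) none)).foldl
        (fun acc p => pvRowWins (PySem.List.slice p.1 none (some (c : Int)))
                                (PySem.List.slice p.2 none (some (c : Int))) acc) []
        = ws := by
      rw [PySem.List.foldl_congr_mem _ _
            (fun acc p => acc ++ (PySem.List.pyRange 0 ((c : Int) - 1) 1).map (fun j =>
              [PySem.List.pyGetD p.1 j 0, PySem.List.pyGetD p.1 (j + 1) 0,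
               PySem.List.pyGetD p.2 j 0, PySem.List.pyGetD p.2 (j + 1) 0])) []
            (by
              intro acc p hp
              obtain ⟨p1, p2⟩ := p
              have hp12 := List.of_mem_zip hp
              have hp2m : p2 ∈ matrix := by
                have := hp12.2
                rw [PySem.List.slice_from_one] at this
                exact List.mem_of_mem_tail this
              exact pv_rowWins_eq p1 p2 c (hall _ hp12.1) (hall _ hp2m) acc)]
      rw [PySem.List.foldl_append_eq_flatMap, List.nil_append,
          PySem.List.slice_from_one, pv_zip_adjacent, List.flatMap_map]
      rfl
    rw [hBwin]
    set sw := PySem.List.sorted ws (fun x => x) false with hsw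
    have hperm : sw.Perm ws := PySem.List.sorted_perm ws (fun x => x) false
    have hswne : sw ≠ [] := by
      intro h
      rw [h] at hperm
      exact hwsne hperm.symm.eq_nil
    have hpair : sw.Pairwise (fun a b => a ≤ b) := by
      rw [hsw, pv_sorted_inst]
      exact PySem.List.sorted_pairwise ws (fun x => x)
    rw [PySem.List.slice_from_one, PySem.List.foldl_count_if]
    rw [List.toFinset_eq_of_perm sw ws hperm |>.symm]
    rw [← pv_groups_eq_card sw hswne hpair]
    simp only [Nat.cast_add, Nat.cast_one]
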